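-- pv_equiv track=rewrite | github.com/vidagy/aoc | aoc/year_2022/task_08.py | calculate_max_to_side
-- ===== SOURCE A (Python) =====
-- from copy import deepcopy
-- from typing import Any
--
-- def initialize_matrix(size_x: int, size_y: int, value: Any) -> list[list[Any]]:
--     res: list[list[int]] = []
--     for j in range(size_y):
--         res.append([])
--         for i in range(size_x):
--             res[j].append(deepcopy(value))
--     return res
--
-- def calculate_max_to_side(lines: list[list[int]]) -> list[list[dict[str, int]]]:
--     size_x, size_y = len(lines[0]), len(lines)
--     max_to_side: list[list[dict[str, int]]] = initialize_matrix(
--         size_x, size_y, {"l": 0, "r": 0, "u": 0, "d": 0}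
--     )
--
--     # left
--     for i in range(1, size_x):
--         for j in range(size_y):
--             max_to_side[j][i]["l"] = max(max_to_side[j][i - 1]["l"], lines[j][i - 1])
--
--     # right
--     for i in range(size_x - 2, -1, -1):
--         for j in range(size_y):
--             max_to_side[j][i]["r"] = max(max_to_side[j][i + 1]["r"], lines[j][i + 1])
--
--     # up
--     for j in range(1, size_y):
--         for i in range(size_x):
--             max_to_side[j][i]["u"] = max(max_to_side[j - 1][i]["u"], lines[j - 1][i])
--
--     # down
--     for j in range(size_y - 2, -1, -1):
--         for i in range(size_x):
--             max_to_side[j][i]["d"] = max(max_to_side[j + 1][i]["d"], lines[j + 1][i])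
--     return max_to_side
-- ===== SOURCE B (Python) =====
-- def calculate_max_to_side(lines):
--     size_x, size_y = len(lines[0]), len(lines)
--
--     def tallest(vals):
--         best = 0
--         for v in vals:
--             best = max(best, v)
--         return best
--
--     return [
--         [
--             {
--                 "l": tallest(lines[j][ii] for ii in range(i)),
--                 "r": tallest(lines[j][ii] for ii in range(i + 1, size_x)),
--                 "u": tallest(lines[jj][i] for jj in range(j)),
--                 "d": tallest(lines[jj][i] for jj in range(j + 1, size_y)),
--             }
--             for i in range(size_x)
--         ]
--         for j in range(size_y)
--     ]
-- ===== Notes on version B (the rewrite author's own statement) =====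
-- stated objective: simpler
-- what changed: B discards A's dynamic-programming table (four in-place sweeps, each cell reading the neighbouring cell of the matrix being built) and instead computes every cell independently by a direct fold of max over that cell's row prefix, row suffix, column prefix and column suffix, trading O(x*y) for O(x*y*(x+y)) in exchange for a stateless two-line-per-key definition.
import Mathlib
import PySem

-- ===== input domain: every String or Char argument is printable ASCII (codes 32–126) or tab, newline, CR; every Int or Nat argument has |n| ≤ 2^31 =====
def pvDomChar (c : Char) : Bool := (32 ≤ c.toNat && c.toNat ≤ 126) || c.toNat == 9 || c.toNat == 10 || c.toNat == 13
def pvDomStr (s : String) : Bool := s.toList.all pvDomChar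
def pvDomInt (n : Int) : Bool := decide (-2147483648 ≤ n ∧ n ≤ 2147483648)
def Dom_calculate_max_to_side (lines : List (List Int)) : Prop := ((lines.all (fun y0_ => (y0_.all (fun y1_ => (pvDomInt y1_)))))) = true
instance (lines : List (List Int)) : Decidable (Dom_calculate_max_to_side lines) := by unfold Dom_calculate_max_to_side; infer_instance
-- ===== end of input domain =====

-- B drops A's dynamic-programming table (four in-place neighbour-reading sweeps) and computes each
-- cell independently by folding max over that cell's row/column segment (objective: simpler; not faster).

-- ===== PORT A =====
-- lines[j][i] (defaults unreached: the loops only use indices in range under Pre_)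
def pvGetLine (lines : List (List Int)) (j i : Int) : Int :=
  PySem.List.pyGetD (PySem.List.pyGetD lines j []) i 0

-- max_to_side[j][i][k]  (cell always carries the key; indices in range under Pre_)
def pvGetCell (m : List (List (PySem.Dict String Int))) (j i : Int) (k : String) : Int :=
  PySem.Dict.getD (PySem.List.pyGetD (PySem.List.pyGetD m j []) i PySem.Dict.empty) k 0

-- max_to_side[j][i][k] = v  (j,i come from range(...), hence 0 ≤ and in range: toNat is exact)
def pvSetCell (m : List (List (PySem.Dict String Int))) (j i : Int) (k : String) (v : Int) :
    List (List (PySem.Dict String Int)) :=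
  m.modify j.toNat (fun row => row.modify i.toNat (fun c => c.insert k v))

def initialize_matrix (size_x size_y : Int) (value : PySem.Dict String Int) :
    List (List (PySem.Dict String Int)) :=
  (PySem.List.pyRange 0 size_y 1).foldl (fun res j =>
    let res := res ++ [[]]
    (PySem.List.pyRange 0 size_x 1).foldl (fun res _i =>
      res.modify j.toNat (fun row => row ++ [value])) res) []

def calculate_max_to_side (lines : List (List Int)) : List (List (List (String × Int))) :=
  -- len(lines[0]): IndexError on empty `lines`, excluded by Pre_ (pyGetD default unreached)
  let size_x : Int := ((PySem.List.pyGetD lines 0 []).length : Int)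
  let size_y : Int := (lines.length : Int)
  let m0 := initialize_matrix size_x size_y
      (PySem.Dict.ofList [("l", 0), ("r", 0), ("u", 0), ("d", 0)])
  -- left
  let m1 := (PySem.List.pyRange 1 size_x 1).foldl (fun m i =>
      (PySem.List.pyRange 0 size_y 1).foldl (fun m j =>
        pvSetCell m j i "l" (max (pvGetCell m j (i-1) "l") (pvGetLine lines j (i-1)))) m) m0
  -- right
  let m2 := (PySem.List.pyRange (size_x-2) (-1) (-1)).foldl (fun m i =>
      (PySem.List.pyRange 0 size_y 1).foldl (fun m j =>
        pvSetCell m j i "r" (max (pvGetCell m j (i+1) "r") (pvGetLine lines j (i+1)))) m) m1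
  -- up
  let m3 := (PySem.List.pyRange 1 size_y 1).foldl (fun m j =>
      (PySem.List.pyRange 0 size_x 1).foldl (fun m i =>
        pvSetCell m j i "u" (max (pvGetCell m (j-1) i "u") (pvGetLine lines (j-1) i))) m) m2
  -- down
  let m4 := (PySem.List.pyRange (size_y-2) (-1) (-1)).foldl (fun m j =>
      (PySem.List.pyRange 0 size_x 1).foldl (fun m i =>
        pvSetCell m j i "d" (max (pvGetCell m (j+1) i "d") (pvGetLine lines (j+1) i))) m) m3
  m4.map (fun row => row.map PySem.Dict.items)

-- ===== PORT B =====
-- lines[jj][ii] (indices in range under Pre_, default unreached)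
def pvAt (lines : List (List Int)) (j i : Int) : Int :=
  PySem.List.pyGetD (PySem.List.pyGetD lines j []) i 0

-- the helper `tallest`: best = 0; for v in vals: best = max(best, v)
def tallest (vals : List Int) : Int := vals.foldl (fun best v => max best v) 0

def calculate_max_to_side_alt (lines : List (List Int)) : List (List (List (String × Int))) :=
  -- len(lines[0]): IndexError on empty `lines`, excluded by Pre_ (pyGetD default unreached)
  let size_x : Int := ((PySem.List.pyGetD lines 0 []).length : Int)
  let size_y : Int := (lines.length : Int)
  (PySem.List.pyRange 0 size_y 1).map (fun j =>
    (PySem.List.pyRange 0 size_x 1).map (fun i =>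
      [("l", tallest ((PySem.List.pyRange 0 i 1).map (fun ii => pvAt lines j ii))),
       ("r", tallest ((PySem.List.pyRange (i+1) size_x 1).map (fun ii => pvAt lines j ii))),
       ("u", tallest ((PySem.List.pyRange 0 j 1).map (fun jj => pvAt lines jj i))),
       ("d", tallest ((PySem.List.pyRange (j+1) size_y 1).map (fun jj => pvAt lines jj i)))]))

-- ===== PRECONDITION & SPEC =====
-- A raises IndexError exactly when `lines` is empty or (with ≥2 rows and a nonempty first row)
-- some row is shorter than the first row; Pre_ excludes exactly those crashing inputs.
def Pre_calculate_max_to_side (lines : List (List Int)) : Prop :=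
  lines ≠ [] ∧ ∀ row ∈ lines, (lines.headD []).length ≤ row.length
instance (lines : List (List Int)) : Decidable (Pre_calculate_max_to_side lines) := by
  unfold Pre_calculate_max_to_side; infer_instance

def pvWitness_calculate_max_to_side : List (List Int) := [[3, 1], [0, 5]]

def Spec_calculate_max_to_side (lines : List (List Int)) (out : List (List (List (String × Int)))) : Prop :=
  out = calculate_max_to_side_alt lines
instance (lines : List (List Int)) (out : List (List (List (String × Int)))) :
    Decidable (Spec_calculate_max_to_side lines out) := by
  unfold Spec_calculate_max_to_side; infer_instance

-- ===== CLAIM (what is proved, stated in full; the proofs are below) =====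
def Claim_equal_calculate_max_to_side : Prop :=
  ∀ (lines : List (List Int)), Dom_calculate_max_to_side lines →
    Pre_calculate_max_to_side lines →
    Spec_calculate_max_to_side lines (calculate_max_to_side lines)

-- ===== LEMMAS AND PROOFS =====

-- the 4-key cell; every cell of A's matrix has this shape
def mkC (l r u d : Int) : PySem.Dict String Int :=
  PySem.Dict.ofList [("l", l), ("r", r), ("u", u), ("d", d)]

@[simp] lemma mkC_insert_l (l r u d v : Int) : (mkC l r u d).insert "l" v = mkC v r u d := rfl
@[simp] lemma mkC_insert_r (l r u d v : Int) : (mkC l r u d).insert "r" v = mkC l v u d := rfl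
@[simp] lemma mkC_insert_u (l r u d v : Int) : (mkC l r u d).insert "u" v = mkC l r v d := rfl
@[simp] lemma mkC_insert_d (l r u d v : Int) : (mkC l r u d).insert "d" v = mkC l r u v := rfl
@[simp] lemma mkC_getD_l (l r u d : Int) : (mkC l r u d).getD "l" 0 = l := rfl
@[simp] lemma mkC_getD_r (l r u d : Int) : (mkC l r u d).getD "r" 0 = r := rfl
@[simp] lemma mkC_getD_u (l r u d : Int) : (mkC l r u d).getD "u" 0 = u := rfl
@[simp] lemma mkC_getD_d (l r u d : Int) : (mkC l r u d).getD "d" 0 = d := rfl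
@[simp] lemma mkC_items (l r u d : Int) :
    (mkC l r u d).items = [("l", l), ("r", r), ("u", u), ("d", d)] := rfl

-- the four directional values (the common model both ports are reduced to)
def pvLv (lines : List (List Int)) (j i : Nat) : Int := ((lines.getD j []).take i).foldl max 0
def pvRv (lines : List (List Int)) (sx j i : Nat) : Int :=
  (((lines.getD j []).take sx).drop (i+1)).foldl max 0
def pvCol (lines : List (List Int)) (i : Nat) : List Int := lines.map (fun row => row.getD i 0)
def pvUv (lines : List (List Int)) (j i : Nat) : Int := ((pvCol lines i).take j).foldl max 0
def pvDv (lines : List (List Int)) (j i : Nat) : Int := ((pvCol lines i).drop (j+1)).foldl max 0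

def pvModel (lines : List (List Int)) : List (List (List (String × Int))) :=
  let sx := (PySem.List.pyGetD lines 0 []).length
  (List.range lines.length).map (fun j => (List.range sx).map (fun i =>
    [("l", pvLv lines j i), ("r", pvRv lines sx j i),
     ("u", pvUv lines j i), ("d", pvDv lines j i)]))

-- ---- generic fold/max lemmas ----
lemma foldl_max_shift (l : List Int) (a x : Int) :
    List.foldl max (max a x) l = max (List.foldl max a l) x := by
  induction l generalizing a with
  | nil => rfl
  | cons y t ih =>
      simp only [List.foldl_cons]
      rw [show max (max a x) y = max (max a y) x by
        rw [max_right_comm], ih]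

-- ---- generic loop-shape lemmas for A's passes ----
lemma foldl_congr_fun {α β : Type} {f g : α → β → α} (h : ∀ a b, f a b = g a b)
    (l : List β) (init : α) : l.foldl f init = l.foldl g init := by
  have : f = g := funext fun a => funext fun b => h a b
  rw [this]

lemma mapIdx_mapIdx' {α β γ : Type} (f : Nat → α → β) (g : Nat → β → γ) (l : List α) :
    (l.mapIdx f).mapIdx g = l.mapIdx (fun i a => g i (f i a)) := by
  apply List.ext_getElem <;> simp

lemma mapIdx_map_range {α β : Type} (f : Nat → α) (g : Nat → α → β) (n : Nat) :
    ((List.range n).map f).mapIdx g = (List.range n).map (fun j => g j (f j)) := by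
  apply List.ext_getElem <;> simp

lemma foldl_range_modify {α : Type} (g : Nat → α → α) (m : List α) (k : Nat) :
    (List.range k).foldl (fun acc j => acc.modify j (g j)) m
      = m.mapIdx (fun j a => if j < k then g j a else a) := by
  induction k with
  | zero => apply List.ext_getElem <;> simp
  | succ k ih =>
      rw [List.range_succ, List.foldl_append, ih, List.foldl_cons, List.foldl_nil]
      apply List.ext_getElem
      · simp
      · intro i h1 h2
        simp only [List.getElem_modify, List.getElem_mapIdx]
        by_cases hk : k = i
        · subst hk; simp
        · simp only [hk, if_false]
          by_cases hik : i < k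
          · simp [hik, show i < k + 1 by omega]
          · simp [hik, show ¬ i < k + 1 by omega]

lemma foldl_mapIdx_swap {α : Type} (G : Int → Nat → α → α) (I : List Int) (m : List α) :
    I.foldl (fun acc i => acc.mapIdx (fun j row => G i j row)) m
      = m.mapIdx (fun j row => I.foldl (fun row i => G i j row) row) := by
  induction I generalizing m with
  | nil => simp only [List.foldl_nil]; apply List.ext_getElem <;> simp
  | cons i I ih =>
      simp only [List.foldl_cons]
      rw [ih, mapIdx_mapIdx']

lemma modify_modify {α : Type} (l : List α) (j : Nat) (f g : α → α) :
    (l.modify j f).modify j g = l.modify j (fun a => g (f a)) := by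
  apply List.ext_getElem
  · simp
  · intro i h1 h2
    simp only [List.getElem_modify]
    by_cases h : j = i <;> simp [h]

lemma getD_modify_ne {α : Type} (l : List α) (j k : Nat) (f : α → α) (d : α) (h : k ≠ j) :
    (l.modify j f).getD k d = l.getD k d := by
  simp only [List.getD_eq_getElem?_getD, List.getElem?_modify]
  cases l[k]? <;> simp [Ne.symm h]

lemma foldl_modify_other {α : Type} (I : List Int) (j k : Nat) (hjk : k ≠ j)
    (F : Int → α → α → α) (m : List α) (d : α) :
    I.foldl (fun acc i => acc.modify j (F i (acc.getD k d))) m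
      = m.modify j (fun row => I.foldl (fun row i => F i (m.getD k d) row) row) := by
  induction I generalizing m with
  | nil => simp only [List.foldl_nil]; apply List.ext_getElem <;> simp [List.getElem_modify]
  | cons i I ih =>
      simp only [List.foldl_cons]
      rw [ih, getD_modify_ne _ _ _ _ _ hjk, modify_modify]

lemma foldl_range_pointwise {α : Type} (h : Nat → α → α) (f : Nat → α) (sx k : Nat) (hk : k ≤ sx) :
    (List.range k).foldl (fun row i => row.modify i (h i)) ((List.range sx).map f)
      = (List.range sx).map (fun i => if i < k then h i (f i) else f i) := by
  induction k with
  | zero => simp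
  | succ k ih =>
      rw [List.range_succ, List.foldl_append, ih (by omega), List.foldl_cons, List.foldl_nil]
      apply List.ext_getElem
      · simp
      · intro i h1 h2
        simp only [List.getElem_modify, List.getElem_map, List.getElem_range]
        by_cases hk' : k = i
        · subst hk'; simp
        · simp only [hk', if_false]
          by_cases hik : i < k
          · simp [hik, show i < k + 1 by omega]
          · simp [hik, show ¬ i < k + 1 by omega]


lemma pyRange_desc (a : Int) :
    PySem.List.pyRange a (-1) (-1) = (List.range (a+1).toNat).map (fun (k : Nat) => a - (k : Int)) := by
  simp only [PySem.List.pyRange]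
  rw [if_neg (by norm_num), if_neg (by norm_num)]
  by_cases h : (-1 : Int) < a
  · rw [if_pos h, show (a - -1 + - -1 - 1) / - -1 = a + 1 from by norm_num]
    exact List.map_congr_left (fun k _ => by ring)
  · rw [if_neg h, show (a + 1).toNat = 0 from by omega]
    rfl

-- ---- init ----
lemma modify_append_length {α : Type} (xs : List α) (y : α) (g : α → α) :
    (xs ++ [y]).modify xs.length g = xs ++ [g y] := by
  apply List.ext_getElem
  · simp
  · intro i h1 h2
    simp only [List.getElem_modify]
    by_cases h : xs.length = i
    · subst h
      rw [List.getElem_concat_length rfl, List.getElem_concat_length rfl]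
      simp
    · have hi : i < xs.length := by
        simp only [List.length_modify, List.length_append, List.length_cons,
          List.length_nil] at h1
        omega
      rw [if_neg h, List.getElem_append_left hi, List.getElem_append_left hi]

lemma append_fold_replicate {α β : Type} (L : List β) (xs : List (List α)) (y : List α) (v : α) :
    L.foldl (fun r (_ : β) => r.modify xs.length (fun row => row ++ [v])) (xs ++ [y])
      = xs ++ [y ++ List.replicate L.length v] := by
  induction L generalizing y with
  | nil => simp
  | cons b L ih =>
      simp only [List.foldl_cons, List.length_cons]
      rw [modify_append_length, ih, List.append_assoc]
      congr 2

lemma initialize_matrix_eq (sx sy : Nat) (v : PySem.Dict String Int) :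
    initialize_matrix (sx : Int) (sy : Int) v
      = (List.range sy).map (fun _ => (List.range sx).map (fun _ => v)) := by
  have hx : PySem.List.pyRange 0 (sx : Int) 1 = (List.range sx).map (fun (k : Nat) => (k : Int)) := by
    rw [PySem.List.pyRange_one, show ((sx : Int) - 0).toNat = sx from by omega]
    exact List.map_congr_left (fun k _ => by ring)
  have hy : PySem.List.pyRange 0 (sy : Int) 1 = (List.range sy).map (fun (k : Nat) => (k : Int)) := by
    rw [PySem.List.pyRange_one, show ((sy : Int) - 0).toNat = sy from by omega]
    exact List.map_congr_left (fun k _ => by ring)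
  unfold initialize_matrix
  rw [hx, hy, List.foldl_map]
  simp only [Int.toNat_natCast]
  have main : ∀ n : Nat,
      (List.range n).foldl
        (fun res (j : Nat) =>
          ((List.range sx).map (fun (k : Nat) => (k : Int))).foldl
            (fun res _i => res.modify j fun row => row ++ [v]) (res ++ [[]]))
        []
      = List.replicate n (List.replicate sx v) := by
    intro n
    induction n with
    | zero => rfl
    | succ n ih =>
        rw [List.range_succ, List.foldl_append, ih, List.foldl_cons, List.foldl_nil]
        have h1 : (List.replicate n (List.replicate sx v) : List (List (PySem.Dict String Int))).length = n := by
          simp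
        have h2 := append_fold_replicate ((List.range sx).map (fun (k : Nat) => (k : Int)))
          (List.replicate n (List.replicate sx v)) [] v
        rw [h1] at h2
        rw [h2]
        simp [List.replicate_succ']
  rw [main sy]
  simp [List.map_const']

-- ---- the per-element step of an inner (over j) loop as a self-modify ----
lemma setCell_self (m : List (List (PySem.Dict String Int))) (k : Nat) (i x : Int)
    (key : String) (c : Int) :
    pvSetCell m (k : Int) i key (max (pvGetCell m (k : Int) x key) c)
      = m.modify k (fun row => row.modify i.toNat (fun cc => cc.insert key
          (max (PySem.Dict.getD (PySem.List.pyGetD row x PySem.Dict.empty) key 0) c))) := by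
  unfold pvSetCell pvGetCell
  rw [Int.toNat_natCast]
  rcases h : m[k]? with _ | row
  · rw [List.modify_eq_set_getElem?, List.modify_eq_set_getElem?, h]
    rfl
  · have hrow : PySem.List.pyGetD m ((k : Nat) : Int) [] = row := by
      rw [PySem.List.pyGetD_natCast]
      simp [List.getD_eq_getElem?_getD, h]
    rw [List.modify_eq_set_getElem?, List.modify_eq_set_getElem?, h, hrow]
    rfl

lemma lrInner (lines : List (List Int)) (sy : Nat) (key : String) (i x : Int)
    (m : List (List (PySem.Dict String Int))) :
    (PySem.List.pyRange 0 (sy : Int) 1).foldl (fun m j =>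
        pvSetCell m j i key (max (pvGetCell m j x key) (pvGetLine lines j x))) m
      = m.mapIdx (fun j row => if j < sy then row.modify i.toNat (fun cc => cc.insert key
          (max (PySem.Dict.getD (PySem.List.pyGetD row x PySem.Dict.empty) key 0)
               (pvGetLine lines (j : Int) x))) else row) := by
  have hr : PySem.List.pyRange 0 (sy : Int) 1 = (List.range sy).map (fun (k : Nat) => (k : Int)) := by
    rw [PySem.List.pyRange_one, show ((sy : Int) - 0).toNat = sy from by omega]
    exact List.map_congr_left (fun k _ => by ring)
  rw [hr, List.foldl_map,
    foldl_congr_fun (fun m k => setCell_self m k i x key (pvGetLine lines (k : Int) x)),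
    foldl_range_modify]

-- ---- 1D row passes ----
lemma leftRow (vals : List Int) (sx : Nat) (hv : sx ≤ vals.length) (A B C D : Nat → Int) :
    (PySem.List.pyRange 1 (sx : Int) 1).foldl
      (fun row i => row.modify i.toNat (fun c => c.insert "l"
        (max (PySem.Dict.getD (PySem.List.pyGetD row (i-1) PySem.Dict.empty) "l" 0)
             (PySem.List.pyGetD vals (i-1) 0))))
      ((List.range sx).map (fun i => mkC (A i) (B i) (C i) (D i)))
    = (List.range sx).map (fun i =>
        mkC ((vals.take i).foldl max (A 0)) (B i) (C i) (D i)) := by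
  have aux : ∀ n, n ≤ sx →
      (PySem.List.pyRange 1 (n : Int) 1).foldl
        (fun row i => row.modify i.toNat (fun c => c.insert "l"
          (max (PySem.Dict.getD (PySem.List.pyGetD row (i-1) PySem.Dict.empty) "l" 0)
               (PySem.List.pyGetD vals (i-1) 0))))
        ((List.range sx).map (fun i => mkC (A i) (B i) (C i) (D i)))
      = (List.range sx).map (fun i =>
          mkC (if i < n ∨ i = 0 then (vals.take i).foldl max (A 0) else A i)
            (B i) (C i) (D i)) := by
    intro n
    induction n with
    | zero =>
        intro _
        rw [PySem.List.pyRange_one_eq_nil (by norm_num), List.foldl_nil]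
        refine List.map_congr_left (fun i _ => ?_)
        rcases Nat.eq_zero_or_pos i with h0 | h0
        · subst h0; simp
        · rw [if_neg (show ¬(i < 0 ∨ i = 0) by omega)]
    | succ n ih =>
        intro hn
        rcases Nat.eq_zero_or_pos n with h0 | h0
        · subst h0
          rw [show ((1 : Nat) : Int) = 1 by norm_num,
            PySem.List.pyRange_one_eq_nil (by norm_num), List.foldl_nil]
          refine List.map_congr_left (fun i _ => ?_)
          rcases Nat.eq_zero_or_pos i with hi | hi
          · subst hi; simp
          · rw [if_neg (show ¬(i < 1 ∨ i = 0) by omega)]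
        · have h1 : (1 : Int) ≤ (n : Int) := by exact_mod_cast h0
          rw [show ((n + 1 : Nat) : Int) = (n : Int) + 1 by push_cast; ring,
            PySem.List.pyRange_one_succ_right h1, List.foldl_append, ih (by omega),
            List.foldl_cons, List.foldl_nil]
          have hn1 : n - 1 < sx := by omega
          have hcast : ((n : Int)) - 1 = ((n - 1 : Nat) : Int) := by omega
          have hcell : PySem.List.pyGetD
              ((List.range sx).map (fun i =>
                mkC (if i < n ∨ i = 0 then (vals.take i).foldl max (A 0) else A i)
                  (B i) (C i) (D i))) ((n : Int) - 1) PySem.Dict.empty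
              = mkC ((vals.take (n-1)).foldl max (A 0)) (B (n-1)) (C (n-1)) (D (n-1)) := by
            rw [hcast, PySem.List.pyGetD_natCast, PySem.List.getD_map_range _ _ _ _ hn1,
              if_pos (show n - 1 < n ∨ n - 1 = 0 by omega)]
          have hval : PySem.List.pyGetD vals ((n : Int) - 1) 0 = vals[n-1]'(by omega) := by
            rw [hcast, PySem.List.pyGetD_natCast, List.getD_eq_getElem vals 0 (by omega)]
          have htake : vals.take n = vals.take (n-1) ++ [vals[n-1]'(by omega)] := by
            conv_lhs => rw [show n = (n-1)+1 by omega]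
            rw [List.take_add_one, List.getElem?_eq_getElem (by omega)]
            rfl
          rw [hcell, hval]
          apply List.ext_getElem
          · simp
          · intro t h1' h2'
            simp only [List.getElem_modify, List.getElem_map, List.getElem_range,
              Int.toNat_natCast]
            by_cases ht : n = t
            · subst ht
              rw [if_pos rfl]
              simp only [show ¬(n < n ∨ n = 0) by omega, if_false, mkC_getD_l, mkC_insert_l,
                show n < n + 1 ∨ n = 0 by omega, if_true]
              rw [htake, List.foldl_append]
              simp
            · rw [if_neg ht]
              by_cases hc : t < n ∨ t = 0
              · rw [if_pos hc, if_pos (show t < n + 1 ∨ t = 0 by omega)]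
              · rw [if_neg hc, if_neg (show ¬(t < n + 1 ∨ t = 0) by omega)]
  rw [aux sx le_rfl]
  refine List.map_congr_left (fun i hi => ?_)
  have : i < sx := List.mem_range.mp hi
  simp [show i < sx ∨ i = 0 by omega]

lemma rightRow (vals : List Int) (sx : Nat) (hv : sx ≤ vals.length) (A B C D : Nat → Int) :
    (PySem.List.pyRange ((sx : Int) - 2) (-1) (-1)).foldl
      (fun row i => row.modify i.toNat (fun c => c.insert "r"
        (max (PySem.Dict.getD (PySem.List.pyGetD row (i+1) PySem.Dict.empty) "r" 0)
             (PySem.List.pyGetD vals (i+1) 0))))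
      ((List.range sx).map (fun i => mkC (A i) (B i) (C i) (D i)))
    = (List.range sx).map (fun i =>
        mkC (A i) (((vals.take sx).drop (i+1)).foldl max (B (sx-1))) (C i) (D i)) := by
  have hlen : (vals.take sx).length = sx := by
    rw [List.length_take]
    exact Nat.min_eq_left hv
  have aux : ∀ n, n ≤ sx - 1 →
      ((List.range n).map (fun (k : Nat) => (sx : Int) - 2 - (k : Int))).foldl
        (fun row i => row.modify i.toNat (fun c => c.insert "r"
          (max (PySem.Dict.getD (PySem.List.pyGetD row (i+1) PySem.Dict.empty) "r" 0)
               (PySem.List.pyGetD vals (i+1) 0))))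
        ((List.range sx).map (fun i => mkC (A i) (B i) (C i) (D i)))
      = (List.range sx).map (fun i =>
          mkC (A i)
            (if sx - 1 - n ≤ i then ((vals.take sx).drop (i+1)).foldl max (B (sx-1)) else B i)
            (C i) (D i)) := by
    intro n
    induction n with
    | zero =>
        intro _
        rw [List.range_zero, List.map_nil, List.foldl_nil]
        simp only [Nat.sub_zero]
        refine List.map_congr_left (fun i hi => ?_)
        have hisx : i < sx := List.mem_range.mp hi
        by_cases hc : sx - 1 ≤ i
        · have : i = sx - 1 := by omega
          subst this
          rw [if_pos hc, List.drop_eq_nil_of_le (by omega)]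
          rfl
        · rw [if_neg hc]
    | succ n ih =>
        intro hn
        have hsx2 : sx ≥ 2 := by omega
        rw [List.range_succ, List.map_append, List.foldl_append, ih (by omega),
          List.map_cons, List.map_nil, List.foldl_cons, List.foldl_nil]
        have hi0 : sx - 2 - n < sx := by omega
        have hi1 : sx - 1 - n < sx := by omega
        have hcast : (sx : Int) - 2 - (n : Int) = ((sx - 2 - n : Nat) : Int) := by omega
        have hcast1 : ((sx - 2 - n : Nat) : Int) + 1 = ((sx - 1 - n : Nat) : Int) := by omega
        have hcell : PySem.List.pyGetD
            ((List.range sx).map (fun i =>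
              mkC (A i)
                (if sx - 1 - n ≤ i then ((vals.take sx).drop (i+1)).foldl max (B (sx-1)) else B i)
                (C i) (D i))) (((sx - 2 - n : Nat) : Int) + 1) PySem.Dict.empty
            = mkC (A (sx-1-n)) (((vals.take sx).drop (sx-1-n+1)).foldl max (B (sx-1)))
                (C (sx-1-n)) (D (sx-1-n)) := by
          rw [hcast1, PySem.List.pyGetD_natCast, PySem.List.getD_map_range _ _ _ _ hi1,
            if_pos (show sx - 1 - n ≤ sx - 1 - n from le_rfl)]
        have hval : PySem.List.pyGetD vals (((sx - 2 - n : Nat) : Int) + 1) 0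
            = vals[sx-1-n]'(by omega) := by
          rw [hcast1, PySem.List.pyGetD_natCast, List.getD_eq_getElem vals 0 (by omega)]
        have hdrop : (vals.take sx).drop (sx-2-n+1)
            = vals[sx-1-n]'(by omega) :: (vals.take sx).drop (sx-1-n+1) := by
          have h' : sx - 1 - n < (vals.take sx).length := by omega
          rw [show sx - 2 - n + 1 = sx - 1 - n by omega, List.drop_eq_getElem_cons h']
          congr 1
          rw [List.getElem_take]
        rw [hcast, hcell, hval]
        apply List.ext_getElem
        · simp
        · intro t h1' h2'
          simp only [List.getElem_modify, List.getElem_map, List.getElem_range,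
            Int.toNat_natCast]
          by_cases ht : sx - 2 - n = t
          · subst ht
            rw [if_pos rfl]
            simp only [show ¬(sx - 1 - n ≤ sx - 2 - n) by omega, if_false, mkC_getD_r,
              mkC_insert_r, show sx - 1 - (n+1) ≤ sx - 2 - n by omega, if_true]
            congr 1
            rw [hdrop, List.foldl_cons, foldl_max_shift]
          · rw [if_neg ht]
            by_cases hc : sx - 1 - n ≤ t
            · rw [if_pos hc, if_pos (show sx - 1 - (n+1) ≤ t by omega)]
            · rw [if_neg hc, if_neg (show ¬(sx - 1 - (n+1) ≤ t) by omega)]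
  have hdesc : PySem.List.pyRange ((sx : Int) - 2) (-1) (-1)
      = (List.range (sx - 1)).map (fun (k : Nat) => (sx : Int) - 2 - (k : Int)) := by
    rw [pyRange_desc, show ((sx : Int) - 2 + 1).toNat = sx - 1 from by omega]
  rw [hdesc, aux (sx - 1) le_rfl]
  refine List.map_congr_left (fun i hi => ?_)
  rw [if_pos (show sx - 1 - (sx - 1) ≤ i by omega)]

-- ---- full matrix passes ----
-- the cell update of the up/down passes, as a named function (so the loop lemma applies)
def pvF (lines : List (List Int)) (key : String) (r : Nat) (i : Int)
    (prev row : List (PySem.Dict String Int)) : List (PySem.Dict String Int) :=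
  row.modify i.toNat (fun cc => cc.insert key
    (max (PySem.Dict.getD (PySem.List.pyGetD prev i PySem.Dict.empty) key 0)
         (pvGetLine lines (r : Int) i)))

lemma leftPass (lines : List (List Int)) (sx sy : Nat) (hsy : sy = lines.length)
    (hsx : ∀ row ∈ lines, sx ≤ row.length) :
    (PySem.List.pyRange 1 (sx : Int) 1).foldl (fun m i =>
        (PySem.List.pyRange 0 (sy : Int) 1).foldl (fun m j =>
          pvSetCell m j i "l" (max (pvGetCell m j (i-1) "l") (pvGetLine lines j (i-1)))) m)
      ((List.range sy).map (fun _ => (List.range sx).map (fun _ => mkC 0 0 0 0)))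
    = (List.range sy).map (fun j => (List.range sx).map (fun i => mkC (pvLv lines j i) 0 0 0)) := by
  rw [show (fun (m : List (List (PySem.Dict String Int))) (i : Int) =>
        (PySem.List.pyRange 0 (sy : Int) 1).foldl (fun m j =>
          pvSetCell m j i "l" (max (pvGetCell m j (i-1) "l") (pvGetLine lines j (i-1)))) m)
      = (fun m i => m.mapIdx (fun j row => if j < sy then
          row.modify i.toNat (fun cc => cc.insert "l"
            (max (PySem.Dict.getD (PySem.List.pyGetD row (i-1) PySem.Dict.empty) "l" 0)
                 (pvGetLine lines (j : Int) (i-1)))) else row))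
      from funext fun m => funext fun i => lrInner lines sy "l" i (i-1) m]
  rw [foldl_mapIdx_swap, mapIdx_map_range]
  refine List.map_congr_left (fun j hj => ?_)
  have hjsy : j < sy := List.mem_range.mp hj
  rw [show (fun (row : List (PySem.Dict String Int)) (i : Int) => if j < sy then
        row.modify i.toNat (fun cc => cc.insert "l"
          (max (PySem.Dict.getD (PySem.List.pyGetD row (i-1) PySem.Dict.empty) "l" 0)
               (pvGetLine lines (j : Int) (i-1)))) else row)
      = (fun row i =>
        row.modify i.toNat (fun cc => cc.insert "l"
          (max (PySem.Dict.getD (PySem.List.pyGetD row (i-1) PySem.Dict.empty) "l" 0)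
               (PySem.List.pyGetD (lines.getD j []) (i-1) 0))))
      from funext fun row => funext fun i => by
        rw [if_pos hjsy]
        unfold pvGetLine
        rw [PySem.List.pyGetD_natCast]]
  have hjl : j < lines.length := by omega
  have hv : sx ≤ (lines.getD j []).length := by
    apply hsx
    rw [List.getD_eq_getElem _ _ hjl]
    exact List.getElem_mem _
  rw [leftRow (lines.getD j []) sx hv (fun _ => 0) (fun _ => 0) (fun _ => 0) (fun _ => 0)]
  exact List.map_congr_left (fun i _ => rfl)

lemma rightPass (lines : List (List Int)) (sx sy : Nat) (hsy : sy = lines.length)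
    (hsx : ∀ row ∈ lines, sx ≤ row.length) :
    (PySem.List.pyRange ((sx : Int) - 2) (-1) (-1)).foldl (fun m i =>
        (PySem.List.pyRange 0 (sy : Int) 1).foldl (fun m j =>
          pvSetCell m j i "r" (max (pvGetCell m j (i+1) "r") (pvGetLine lines j (i+1)))) m)
      ((List.range sy).map (fun j => (List.range sx).map (fun i => mkC (pvLv lines j i) 0 0 0)))
    = (List.range sy).map (fun j => (List.range sx).map (fun i =>
        mkC (pvLv lines j i) (pvRv lines sx j i) 0 0)) := by
  rw [show (fun (m : List (List (PySem.Dict String Int))) (i : Int) =>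
        (PySem.List.pyRange 0 (sy : Int) 1).foldl (fun m j =>
          pvSetCell m j i "r" (max (pvGetCell m j (i+1) "r") (pvGetLine lines j (i+1)))) m)
      = (fun m i => m.mapIdx (fun j row => if j < sy then
          row.modify i.toNat (fun cc => cc.insert "r"
            (max (PySem.Dict.getD (PySem.List.pyGetD row (i+1) PySem.Dict.empty) "r" 0)
                 (pvGetLine lines (j : Int) (i+1)))) else row))
      from funext fun m => funext fun i => lrInner lines sy "r" i (i+1) m]
  rw [foldl_mapIdx_swap, mapIdx_map_range]
  refine List.map_congr_left (fun j hj => ?_)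
  have hjsy : j < sy := List.mem_range.mp hj
  rw [show (fun (row : List (PySem.Dict String Int)) (i : Int) => if j < sy then
        row.modify i.toNat (fun cc => cc.insert "r"
          (max (PySem.Dict.getD (PySem.List.pyGetD row (i+1) PySem.Dict.empty) "r" 0)
               (pvGetLine lines (j : Int) (i+1)))) else row)
      = (fun row i =>
        row.modify i.toNat (fun cc => cc.insert "r"
          (max (PySem.Dict.getD (PySem.List.pyGetD row (i+1) PySem.Dict.empty) "r" 0)
               (PySem.List.pyGetD (lines.getD j []) (i+1) 0))))
      from funext fun row => funext fun i => by
        rw [if_pos hjsy]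
        unfold pvGetLine
        rw [PySem.List.pyGetD_natCast]]
  have hjl : j < lines.length := by omega
  have hv : sx ≤ (lines.getD j []).length := by
    apply hsx
    rw [List.getD_eq_getElem _ _ hjl]
    exact List.getElem_mem _
  rw [rightRow (lines.getD j []) sx hv (fun i => pvLv lines j i) (fun _ => 0) (fun _ => 0)
    (fun _ => 0)]
  exact List.map_congr_left (fun i _ => rfl)

lemma upPass (lines : List (List Int)) (sx sy : Nat) (hsy : sy = lines.length)
    (L R : Nat → Nat → Int) :
    (PySem.List.pyRange 1 (sy : Int) 1).foldl (fun m j =>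
        (PySem.List.pyRange 0 (sx : Int) 1).foldl (fun m i =>
          pvSetCell m j i "u" (max (pvGetCell m (j-1) i "u") (pvGetLine lines (j-1) i))) m)
      ((List.range sy).map (fun j => (List.range sx).map (fun i => mkC (L j i) (R j i) 0 0)))
    = (List.range sy).map (fun j => (List.range sx).map (fun i =>
        mkC (L j i) (R j i) (pvUv lines j i) 0)) := by
  have hx : PySem.List.pyRange 0 (sx : Int) 1 = (List.range sx).map (fun (k : Nat) => (k : Int)) := by
    rw [PySem.List.pyRange_one, show ((sx : Int) - 0).toNat = sx from by omega]
    exact List.map_congr_left (fun k _ => by ring)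
  have hUrec : ∀ (i n : Nat), n < sy →
      pvUv lines (n+1) i = max (pvUv lines n i) ((lines.getD n []).getD i 0) := by
    intro i n hn
    have hnl : n < (pvCol lines i).length := by
      unfold pvCol; rw [List.length_map]; omega
    unfold pvUv
    rw [List.take_add_one, List.getElem?_eq_getElem hnl, List.foldl_append]
    simp only [Option.toList_some, List.foldl_cons, List.foldl_nil]
    congr 1
    rw [List.getD_eq_getElem lines ([] : List Int) (show n < lines.length from by omega)]
    unfold pvCol
    rw [List.getElem_map]
  have aux : ∀ n, n ≤ sy - 1 →
      ((List.range n).map (fun (k : Nat) => (1 : Int) + (k : Int))).foldl (fun m j =>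
          (PySem.List.pyRange 0 (sx : Int) 1).foldl (fun m i =>
            pvSetCell m j i "u" (max (pvGetCell m (j-1) i "u") (pvGetLine lines (j-1) i))) m)
        ((List.range sy).map (fun j => (List.range sx).map (fun i => mkC (L j i) (R j i) 0 0)))
      = (List.range sy).map (fun j => (List.range sx).map (fun i =>
          mkC (L j i) (R j i) (if j ≤ n then pvUv lines j i else 0) 0)) := by
    intro n
    induction n with
    | zero =>
        intro _
        rw [List.range_zero, List.map_nil, List.foldl_nil]
        refine List.map_congr_left (fun j _ => List.map_congr_left (fun i _ => ?_))
        by_cases hj : j = 0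
        · subst hj
          rw [if_pos (le_refl 0)]
          rfl
        · rw [if_neg (show ¬ j ≤ 0 by omega)]
    | succ n ih =>
        intro hn
        rw [List.range_succ, List.map_append, List.foldl_append, ih (by omega),
          List.map_cons, List.map_nil, List.foldl_cons, List.foldl_nil]
        have hnsy : n + 1 < sy := by omega
        have hJ1 : (1 : Int) + (n : Int) - 1 = ((n : Nat) : Int) := by ring
        rw [show (fun (m : List (List (PySem.Dict String Int))) (i : Int) =>
              pvSetCell m (1 + (n : Int)) i "u"
                (max (pvGetCell m (1 + (n : Int) - 1) i "u")
                     (pvGetLine lines (1 + (n : Int) - 1) i)))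
            = (fun m i => m.modify (n+1) (pvF lines "u" n i (m.getD n [])))
            from funext fun m => funext fun i => by
              unfold pvSetCell pvGetCell pvF
              rw [hJ1, PySem.List.pyGetD_natCast,
                show (1 + (n : Int)).toNat = n + 1 by omega]]
        rw [foldl_modify_other (PySem.List.pyRange 0 (sx : Int) 1) (n+1) n (by omega)
          (pvF lines "u" n) _ []]
        rw [PySem.List.getD_map_range _ _ _ _ (by omega : n < sy)]
        simp only [le_refl, if_true]
        apply List.ext_getElem
        · simp
        · intro t ht1 ht2
          simp only [List.getElem_modify, List.getElem_map, List.getElem_range]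
          by_cases htn : n + 1 = t
          · subst htn
            rw [if_pos rfl]
            simp only [show ¬ (n + 1 ≤ n) by omega, if_false]
            rw [hx, List.foldl_map]
            simp only [pvF, Int.toNat_natCast]
            rw [foldl_range_pointwise _ _ sx sx le_rfl]
            refine List.map_congr_left (fun i hi => ?_)
            have hisx : i < sx := List.mem_range.mp hi
            rw [if_pos hisx]
            rw [show PySem.List.pyGetD
                  ((List.range sx).map (fun i => mkC (L n i) (R n i) (pvUv lines n i) 0))
                  ((i : Nat) : Int) PySem.Dict.empty
                = mkC (L n i) (R n i) (pvUv lines n i) 0 from by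
              rw [PySem.List.pyGetD_natCast, PySem.List.getD_map_range _ _ _ _ hisx]]
            rw [show pvGetLine lines ((n : Nat) : Int) ((i : Nat) : Int)
                = (lines.getD n []).getD i 0 from by
              unfold pvGetLine
              rw [PySem.List.pyGetD_natCast, PySem.List.pyGetD_natCast]]
            simp only [mkC_getD_u, mkC_insert_u]
            rw [← hUrec i n (by omega), if_pos (le_refl (n+1))]
          · rw [if_neg htn]
            refine List.map_congr_left (fun i _ => ?_)
            by_cases hc : t ≤ n
            · rw [if_pos hc, if_pos (show t ≤ n + 1 by omega)]
            · rw [if_neg hc, if_neg (show ¬ (t ≤ n + 1) by omega)]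
  have houter : PySem.List.pyRange 1 (sy : Int) 1
      = (List.range (sy - 1)).map (fun (k : Nat) => (1 : Int) + (k : Int)) := by
    rw [PySem.List.pyRange_one, show ((sy : Int) - 1).toNat = sy - 1 from by omega]
  rw [houter, aux (sy - 1) le_rfl]
  refine List.map_congr_left (fun j hj => List.map_congr_left (fun i _ => ?_))
  have : j < sy := List.mem_range.mp hj
  rw [if_pos (show j ≤ sy - 1 by omega)]

lemma downPass (lines : List (List Int)) (sx sy : Nat) (hsy : sy = lines.length)
    (L R U : Nat → Nat → Int) :
    (PySem.List.pyRange ((sy : Int) - 2) (-1) (-1)).foldl (fun m j =>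
        (PySem.List.pyRange 0 (sx : Int) 1).foldl (fun m i =>
          pvSetCell m j i "d" (max (pvGetCell m (j+1) i "d") (pvGetLine lines (j+1) i))) m)
      ((List.range sy).map (fun j => (List.range sx).map (fun i => mkC (L j i) (R j i) (U j i) 0)))
    = (List.range sy).map (fun j => (List.range sx).map (fun i =>
        mkC (L j i) (R j i) (U j i) (pvDv lines j i))) := by
  have hx : PySem.List.pyRange 0 (sx : Int) 1 = (List.range sx).map (fun (k : Nat) => (k : Int)) := by
    rw [PySem.List.pyRange_one, show ((sx : Int) - 0).toNat = sx from by omega]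
    exact List.map_congr_left (fun k _ => by ring)
  have hcollen : ∀ i : Nat, (pvCol lines i).length = sy := by
    intro i; simp [pvCol]; omega
  have hDtop : ∀ i : Nat, pvDv lines (sy - 1) i = 0 := by
    intro i
    unfold pvDv
    rw [List.drop_eq_nil_of_le (by rw [hcollen]; omega)]
    rfl
  have hDrec : ∀ (i n : Nat), n + 1 ≤ sy - 1 →
      max (pvDv lines (sy-1-n) i) ((lines.getD (sy-1-n) []).getD i 0)
        = pvDv lines (sy-2-n) i := by
    intro i n hn
    have hnl : sy - 1 - n < (pvCol lines i).length := by rw [hcollen]; omega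
    unfold pvDv
    rw [show sy - 2 - n + 1 = sy - 1 - n by omega, List.drop_eq_getElem_cons hnl,
      List.foldl_cons, foldl_max_shift, show sy - 1 - n + 1 = sy - n by omega]
    congr 1
    rw [List.getD_eq_getElem lines ([] : List Int) (show sy - 1 - n < lines.length from by omega)]
    unfold pvCol
    rw [List.getElem_map]
  have aux : ∀ n, n ≤ sy - 1 →
      ((List.range n).map (fun (k : Nat) => (sy : Int) - 2 - (k : Int))).foldl (fun m j =>
          (PySem.List.pyRange 0 (sx : Int) 1).foldl (fun m i =>
            pvSetCell m j i "d" (max (pvGetCell m (j+1) i "d") (pvGetLine lines (j+1) i))) m)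
        ((List.range sy).map (fun j => (List.range sx).map (fun i =>
          mkC (L j i) (R j i) (U j i) 0)))
      = (List.range sy).map (fun j => (List.range sx).map (fun i =>
          mkC (L j i) (R j i) (U j i) (if sy - 1 - n ≤ j then pvDv lines j i else 0))) := by
    intro n
    induction n with
    | zero =>
        intro _
        rw [List.range_zero, List.map_nil, List.foldl_nil]
        simp only [Nat.sub_zero]
        refine List.map_congr_left (fun j hj => List.map_congr_left (fun i _ => ?_))
        have : j < sy := List.mem_range.mp hj
        by_cases hc : sy - 1 ≤ j
        · have : j = sy - 1 := by omega
          subst this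
          rw [if_pos hc, hDtop]
        · rw [if_neg hc]
    | succ n ih =>
        intro hn
        have hsy2 : sy ≥ 2 := by omega
        rw [List.range_succ, List.map_append, List.foldl_append, ih (by omega),
          List.map_cons, List.map_nil, List.foldl_cons, List.foldl_nil]
        have hj0 : sy - 2 - n < sy := by omega
        have hj1 : sy - 1 - n < sy := by omega
        have hcast : (sy : Int) - 2 - (n : Int) = ((sy - 2 - n : Nat) : Int) := by omega
        have hcast1 : (sy : Int) - 2 - (n : Int) + 1 = ((sy - 1 - n : Nat) : Int) := by omega
        rw [show (fun (m : List (List (PySem.Dict String Int))) (i : Int) =>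
              pvSetCell m ((sy : Int) - 2 - (n : Int)) i "d"
                (max (pvGetCell m ((sy : Int) - 2 - (n : Int) + 1) i "d")
                     (pvGetLine lines ((sy : Int) - 2 - (n : Int) + 1) i)))
            = (fun m i => m.modify (sy - 2 - n) (pvF lines "d" (sy - 1 - n) i (m.getD (sy - 1 - n) [])))
            from funext fun m => funext fun i => by
              unfold pvSetCell pvGetCell pvF
              rw [hcast1, PySem.List.pyGetD_natCast,
                show ((sy : Int) - 2 - (n : Int)).toNat = sy - 2 - n by omega]]
        rw [foldl_modify_other (PySem.List.pyRange 0 (sx : Int) 1) (sy - 2 - n) (sy - 1 - n)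
          (by omega) (pvF lines "d" (sy - 1 - n)) _ []]
        rw [PySem.List.getD_map_range _ _ _ _ hj1]
        simp only [le_refl, if_true]
        apply List.ext_getElem
        · simp
        · intro t ht1 ht2
          simp only [List.getElem_modify, List.getElem_map, List.getElem_range]
          by_cases htn : sy - 2 - n = t
          · subst htn
            rw [if_pos rfl]
            simp only [show ¬ (sy - 1 - n ≤ sy - 2 - n) by omega, if_false]
            rw [hx, List.foldl_map]
            simp only [pvF, Int.toNat_natCast]
            rw [foldl_range_pointwise _ _ sx sx le_rfl]
            refine List.map_congr_left (fun i hi => ?_)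
            have hisx : i < sx := List.mem_range.mp hi
            rw [if_pos hisx]
            rw [show PySem.List.pyGetD
                  ((List.range sx).map (fun i =>
                    mkC (L (sy-1-n) i) (R (sy-1-n) i) (U (sy-1-n) i) (pvDv lines (sy-1-n) i)))
                  ((i : Nat) : Int) PySem.Dict.empty
                = mkC (L (sy-1-n) i) (R (sy-1-n) i) (U (sy-1-n) i) (pvDv lines (sy-1-n) i)
                from by
              rw [PySem.List.pyGetD_natCast, PySem.List.getD_map_range _ _ _ _ hisx]]
            rw [show pvGetLine lines ((sy - 1 - n : Nat) : Int) ((i : Nat) : Int)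
                = (lines.getD (sy-1-n) []).getD i 0 from by
              unfold pvGetLine
              rw [PySem.List.pyGetD_natCast, PySem.List.pyGetD_natCast]]
            simp only [mkC_getD_d, mkC_insert_d]
            rw [hDrec i n (by omega), show sy - 1 - (n+1) = sy - 2 - n by omega,
              if_pos (le_refl (sy - 2 - n))]
          · rw [if_neg htn]
            refine List.map_congr_left (fun i _ => ?_)
            by_cases hc : sy - 1 - n ≤ t
            · rw [if_pos hc, if_pos (show sy - 1 - (n+1) ≤ t by omega)]
            · rw [if_neg hc, if_neg (show ¬ (sy - 1 - (n+1) ≤ t) by omega)]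
  have houter : PySem.List.pyRange ((sy : Int) - 2) (-1) (-1)
      = (List.range (sy - 1)).map (fun (k : Nat) => (sy : Int) - 2 - (k : Int)) := by
    rw [pyRange_desc, show ((sy : Int) - 2 + 1).toNat = sy - 1 from by omega]
  rw [houter, aux (sy - 1) le_rfl]
  refine List.map_congr_left (fun j hj => List.map_congr_left (fun i _ => ?_))
  rw [if_pos (show sy - 1 - (sy - 1) ≤ j by omega)]

-- ---- the assembled A-side equality ----
lemma calc_eq_model (lines : List (List Int)) (hpre : Pre_calculate_max_to_side lines) :
    calculate_max_to_side lines = pvModel lines := by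
  obtain ⟨hne, hlen0⟩ := hpre
  have hsx0 : lines.headD [] = PySem.List.pyGetD lines 0 [] := by
    cases lines with
    | nil => exact absurd rfl hne
    | cons a t => rw [PySem.List.pyGetD_zero_cons]; rfl
  set sx := (PySem.List.pyGetD lines 0 []).length with hsxdef
  set sy := lines.length with hsydef
  have hsx : ∀ row ∈ lines, sx ≤ row.length := by
    intro row hr
    have := hlen0 row hr
    rwa [hsx0] at this
  simp only [calculate_max_to_side]
  rw [show PySem.Dict.ofList [("l", (0:Int)), ("r", 0), ("u", 0), ("d", 0)] = mkC 0 0 0 0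
    from rfl]
  rw [initialize_matrix_eq sx sy (mkC 0 0 0 0)]
  rw [leftPass lines sx sy hsydef hsx]
  rw [rightPass lines sx sy hsydef hsx]
  rw [upPass lines sx sy hsydef (fun j i => pvLv lines j i) (fun j i => pvRv lines sx j i)]
  rw [downPass lines sx sy hsydef (fun j i => pvLv lines j i) (fun j i => pvRv lines sx j i)
    (fun j i => pvUv lines j i)]
  simp only [pvModel, List.map_map, ← hsxdef, ← hsydef]
  refine List.map_congr_left (fun j _ => ?_)
  simp only [Function.comp, List.map_map]
  refine List.map_congr_left (fun i _ => ?_)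
  simp [mkC_items]

-- ---- B-side equality ----
-- a pyRange mapped through g, as a List.range fold
lemma map_pyRange {α : Type} (a b : Int) (g : Int → α) :
    (PySem.List.pyRange a b 1).map g
      = (List.range (b - a).toNat).map (fun (k : Nat) => g (a + (k : Int))) := by
  rw [PySem.List.pyRange_one, List.map_map]
  rfl

lemma col_getElem (lines : List (List Int)) (i k : Nat) (hk : k < lines.length)
    (h : k < (pvCol lines i).length) :
    (pvCol lines i)[k]'h = (lines.getD k []).getD i 0 := by
  simp only [pvCol, List.getElem_map]
  rw [List.getD_eq_getElem lines [] hk]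

lemma alt_eq_model (lines : List (List Int)) (hpre : Pre_calculate_max_to_side lines) :
    calculate_max_to_side_alt lines = pvModel lines := by
  obtain ⟨hne, hlen0⟩ := hpre
  have hsx0 : lines.headD [] = PySem.List.pyGetD lines 0 [] := by
    cases lines with
    | nil => exact absurd rfl hne
    | cons a t => rw [PySem.List.pyGetD_zero_cons]; rfl
  set sx := (PySem.List.pyGetD lines 0 []).length with hsxdef
  set sy := lines.length with hsydef
  have hrowlen : ∀ j, j < sy → sx ≤ (lines.getD j []).length := by
    intro j hj
    have hmem : lines.getD j [] ∈ lines := by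
      rw [List.getD_eq_getElem _ _ (show j < lines.length from hj)]
      exact List.getElem_mem _
    have := hlen0 _ hmem
    rwa [hsx0] at this
  have hmax : ∀ l : List Int, tallest l = l.foldl max 0 := fun l => rfl
  have hGL : ∀ (a b : Nat),
      pvAt lines ((a : Nat) : Int) ((b : Nat) : Int)
        = (lines.getD a []).getD b 0 := by
    intro a b
    unfold pvAt
    rw [PySem.List.pyGetD_natCast, PySem.List.pyGetD_natCast]
  have hcollen : ∀ i : Nat, (pvCol lines i).length = sy := by
    intro i; simp [pvCol]; omega
  simp only [calculate_max_to_side_alt, pvModel, ← hsxdef, ← hsydef]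
  rw [map_pyRange (0 : Int) ((sy : Nat) : Int), show (((sy : Nat) : Int) - 0).toNat = sy by omega]
  refine List.map_congr_left (fun j hj => ?_)
  have hjsy : j < sy := List.mem_range.mp hj
  simp only [zero_add]
  rw [map_pyRange (0 : Int) ((sx : Nat) : Int), show (((sx : Nat) : Int) - 0).toNat = sx by omega]
  refine List.map_congr_left (fun i hi => ?_)
  have hisx : i < sx := List.mem_range.mp hi
  simp only [zero_add]
  have hrl : sx ≤ (lines.getD j []).length := hrowlen j hjsy
  -- left
  have hl : tallest ((PySem.List.pyRange 0 ((i : Nat) : Int) 1).map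
        (fun ii => pvAt lines ((j : Nat) : Int) ii)) = pvLv lines j i := by
    rw [map_pyRange (0 : Int) ((i : Nat) : Int), show (((i : Nat) : Int) - 0).toNat = i by omega,
      hmax, pvLv]
    congr 1
    apply List.ext_getElem
    · simp only [List.length_map, List.length_range, List.length_take]
      omega
    · intro k h1 h2
      simp only [List.getElem_map, List.getElem_range, zero_add, List.getElem_take]
      rw [hGL j k]
      exact List.getD_eq_getElem _ 0 (by simp only [List.length_take] at h2; omega)
  -- right
  have hr : tallest ((PySem.List.pyRange (((i : Nat) : Int) + 1) ((sx : Nat) : Int) 1).map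
        (fun ii => pvAt lines ((j : Nat) : Int) ii)) = pvRv lines sx j i := by
    rw [map_pyRange (((i : Nat) : Int) + 1) ((sx : Nat) : Int),
      show (((sx : Nat) : Int) - (((i : Nat) : Int) + 1)).toNat = sx - (i + 1) by omega,
      hmax, pvRv]
    congr 1
    apply List.ext_getElem
    · simp only [List.length_map, List.length_range, List.length_drop, List.length_take]
      omega
    · intro k h1 h2
      have hk : i + 1 + k < sx := by
        simp only [List.length_map, List.length_range] at h1; omega
      simp only [List.getElem_map, List.getElem_range, List.getElem_drop, List.getElem_take]
      rw [show ((i : Nat) : Int) + 1 + (k : Int) = (((i + 1 + k : Nat)) : Int) by push_cast; ring,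
        hGL j (i + 1 + k)]
      exact List.getD_eq_getElem _ 0 (by omega)
  -- up
  have hu : tallest ((PySem.List.pyRange 0 ((j : Nat) : Int) 1).map
        (fun jj => pvAt lines jj ((i : Nat) : Int))) = pvUv lines j i := by
    rw [map_pyRange (0 : Int) ((j : Nat) : Int), show (((j : Nat) : Int) - 0).toNat = j by omega,
      hmax, pvUv]
    congr 1
    apply List.ext_getElem
    · simp only [List.length_map, List.length_range, List.length_take, hcollen]
      omega
    · intro k h1 h2
      have hksy : k < sy := by simp only [List.length_map, List.length_range] at h1; omega
      simp only [List.getElem_map, List.getElem_range, zero_add, List.getElem_take]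
      rw [hGL k i, col_getElem lines i k (by omega)]
  -- down
  have hd : tallest ((PySem.List.pyRange (((j : Nat) : Int) + 1) ((sy : Nat) : Int) 1).map
        (fun jj => pvAt lines jj ((i : Nat) : Int))) = pvDv lines j i := by
    rw [map_pyRange (((j : Nat) : Int) + 1) ((sy : Nat) : Int),
      show (((sy : Nat) : Int) - (((j : Nat) : Int) + 1)).toNat = sy - (j + 1) by omega,
      hmax, pvDv]
    congr 1
    apply List.ext_getElem
    · simp only [List.length_map, List.length_range, List.length_drop, hcollen]
    · intro k h1 h2
      have hksy : j + 1 + k < sy := by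
        simp only [List.length_map, List.length_range] at h1; omega
      simp only [List.getElem_map, List.getElem_range, List.getElem_drop]
      rw [show ((j : Nat) : Int) + 1 + (k : Int) = (((j + 1 + k : Nat)) : Int) by push_cast; ring,
        hGL (j + 1 + k) i, col_getElem lines i (j + 1 + k) (by omega)]
  rw [hl, hr, hu, hd]

-- ===== VERDICT (by name: the statement is the Claim_ definition above) =====
theorem calculate_max_to_side_spec : Claim_equal_calculate_max_to_side := by
  intro lines _ hpre
  unfold Spec_calculate_max_to_side
  rw [calc_eq_model lines hpre, alt_eq_model lines hpre]
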